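-- pv_equiv track=rewrite | github.com/TeeKay-FourTwentyOne/math | ramsey-book-graphs/p31_orbit_analysis.py | symmetric_pairs
-- ===== SOURCE A (Python) =====
-- def symmetric_pairs(p):
--     """Return list of (d, p-d) pairs for d=1..p-1, each pair listed once."""
--     pairs = []
--     seen = set()
--     for d in range(1, p):
--         if d not in seen:
--             comp = p - d
--             pairs.append((min(d, comp), max(d, comp)))
--             seen.add(d)
--             seen.add(comp)
--     return pairs
-- ===== SOURCE B (Python) =====
-- def symmetric_pairs(p):
--     return [(d, p - d) for d in range(1, p // 2 + 1)]
-- ===== Notes on version B (the rewrite author's own statement) =====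
-- stated objective: simpler
-- what changed: Replaces A's seen-set bookkeeping and full scan over all candidate summands with a single comprehension over just the lower half, relying on the arithmetic halfway bound to emit each symmetric pair exactly once, so the set, the membership branch and the min/max wrapper disappear.
import Mathlib
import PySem

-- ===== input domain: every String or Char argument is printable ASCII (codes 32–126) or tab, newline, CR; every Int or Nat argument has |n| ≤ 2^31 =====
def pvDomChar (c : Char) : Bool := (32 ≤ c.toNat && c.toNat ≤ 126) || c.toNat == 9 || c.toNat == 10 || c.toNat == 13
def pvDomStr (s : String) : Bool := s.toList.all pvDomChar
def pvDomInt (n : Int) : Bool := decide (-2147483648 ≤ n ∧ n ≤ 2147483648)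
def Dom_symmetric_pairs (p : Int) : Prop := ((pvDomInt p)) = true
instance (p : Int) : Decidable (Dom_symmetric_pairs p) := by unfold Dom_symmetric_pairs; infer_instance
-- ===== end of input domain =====

-- B replaces A's seen-set bookkeeping over range(1,p) with a direct comprehension
-- over range(1, p//2+1), emitting each symmetric pair exactly once — simpler.


-- ===== PORT A =====
-- one loop iteration of A: skip d if seen, else append (min,max) pair and mark d and p-d
def symA (p : Int) (st : List (Int × Int) × PySem.Set Int) (d : Int) :
    List (Int × Int) × PySem.Set Int :=
  if PySem.Set.contains st.2 d then st
  else
    let comp := p - d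
    (st.1 ++ [((if d ≤ comp then d else comp), (if comp ≤ d then d else comp))],
     PySem.Set.add (PySem.Set.add st.2 d) comp)

def symmetric_pairs (p : Int) : List (Int × Int) :=
  ((PySem.List.pyRange 1 p 1).foldl (symA p) ([], PySem.Set.empty)).1

-- ===== PORT B =====
def symmetric_pairs_alt (p : Int) : List (Int × Int) :=
  (PySem.List.pyRange 1 (PySem.Int.floordiv p 2 + 1) 1).map (fun d => (d, p - d))

-- ===== PRECONDITION & SPEC =====
def Spec_symmetric_pairs (p : Int) (out : List (Int × Int)) : Prop := out = symmetric_pairs_alt p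
instance (p : Int) (out : List (Int × Int)) : Decidable (Spec_symmetric_pairs p out) := by unfold Spec_symmetric_pairs; infer_instance

-- ===== CLAIM (what is proved, stated in full; the proofs are below) =====
def Claim_equal_symmetric_pairs : Prop := ∀ (p : Int), Dom_symmetric_pairs p → Spec_symmetric_pairs p (symmetric_pairs p)

-- ===== LEMMAS AND PROOFS =====

-- A's loop leaves the state unchanged on any block of already-seen values
lemma symA_skip (p : Int) (ds : List Int) (st : List (Int × Int) × PySem.Set Int)
    (h : ∀ d ∈ ds, d ∈ st.2) : ds.foldl (symA p) st = st := by
  induction ds with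
  | nil => rfl
  | cons d ds ih =>
    have hd : PySem.Set.contains st.2 d = true := (PySem.Set.contains_iff st.2 d).mpr (h d (by simp))
    simp only [List.foldl_cons, symA, hd, if_pos]
    exact ih (fun x hx => h x (by simp [hx]))

-- invariant for the first half of A's loop: after processing 1..k (k ≤ p//2),
-- the pairs list is exactly B's list for bound k, and seen = {1..k} ∪ {p-k..p-1}
lemma symA_phase1 (p : Int) (hp : 2 ≤ p) :
    ∀ (k : Nat), (k : Int) ≤ PySem.Int.floordiv p 2 →
    ∃ seen : PySem.Set Int,
      (∀ x : Int, x ∈ seen ↔ ((1 ≤ x ∧ x ≤ (k : Int)) ∨ (p - (k : Int) ≤ x ∧ x ≤ p - 1))) ∧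
      (PySem.List.pyRange 1 ((k : Int) + 1) 1).foldl (symA p) ([], PySem.Set.empty)
        = ((PySem.List.pyRange 1 ((k : Int) + 1) 1).map (fun d => (d, p - d)), seen) := by
  have hm : PySem.Int.floordiv p 2 = p / 2 := PySem.Int.floordiv_eq_ediv_of_pos (by omega)
  intro k
  induction k with
  | zero =>
    intro _
    refine ⟨PySem.Set.empty, ?_, ?_⟩
    · intro x
      constructor
      · intro hx; exact absurd hx (by simp [PySem.Set.empty])
      · intro hx; omega
    · rw [PySem.List.pyRange_one_eq_nil (by omega)]; rfl
  | succ k ih =>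
    intro hk
    have hk2 : 2 * ((k : Int) + 1) ≤ p := by
      rw [hm] at hk
      omega
    obtain ⟨seen, hmem, hfold⟩ := ih (by push_cast at hk ⊢; omega)
    push_cast
    have hd : ((k : Int) + 1) ∉ seen := by
      intro h
      rcases (hmem _).mp h with h | h <;> omega
    have hsplit : PySem.List.pyRange 1 (((k : Nat) + 1 : Int) + 1) 1
        = PySem.List.pyRange 1 ((k : Int) + 1) 1 ++ [(k : Int) + 1] := by
      exact PySem.List.pyRange_one_succ_right (by omega)
    rw [hsplit, List.foldl_append, hfold, List.map_append]
    have hdc : PySem.Set.contains seen ((k : Int) + 1) = false := by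
      rw [← Bool.not_eq_true, PySem.Set.contains_iff]; exact hd
    refine ⟨PySem.Set.add (PySem.Set.add seen ((k : Int) + 1)) (p - ((k : Int) + 1)), ?_, ?_⟩
    · intro x
      simp only [PySem.Set.mem_add, hmem]
      omega
    · simp only [List.foldl_cons, List.foldl_nil, symA, hdc, Bool.false_eq_true, if_false]
      have hmin : (if (k : Int) + 1 ≤ p - ((k : Int) + 1) then (k : Int) + 1 else p - ((k : Int) + 1)) = (k : Int) + 1 := by
        split_ifs <;> omega
      have hmax : (if p - ((k : Int) + 1) ≤ (k : Int) + 1 then (k : Int) + 1 else p - ((k : Int) + 1)) = p - ((k : Int) + 1) := by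
        split_ifs <;> omega
      simp only [hmin, hmax, List.map_cons, List.map_nil]

-- ===== VERDICT (by name: the statement is the Claim_ definition above) =====
theorem symmetric_pairs_spec : Claim_equal_symmetric_pairs := by
  intro p _
  unfold Spec_symmetric_pairs symmetric_pairs symmetric_pairs_alt
  have hm : PySem.Int.floordiv p 2 = p / 2 := PySem.Int.floordiv_eq_ediv_of_pos (by omega)
  by_cases hp : p ≤ 1
  · rw [PySem.List.pyRange_one_eq_nil (by omega),
      PySem.List.pyRange_one_eq_nil (by rw [hm]; omega)]
    rfl
  · have hp2 : 2 ≤ p := by omega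
    have hm1 : 1 ≤ PySem.Int.floordiv p 2 := by rw [hm]; omega
    have hmp : PySem.Int.floordiv p 2 + 1 ≤ p := by rw [hm]; omega
    have h2m : p - 1 ≤ 2 * PySem.Int.floordiv p 2 := by rw [hm]; omega
    have hk : (((PySem.Int.floordiv p 2).toNat : Int)) = PySem.Int.floordiv p 2 :=
      Int.toNat_of_nonneg (by omega)
    obtain ⟨seen, hmem, hfold⟩ := symA_phase1 p hp2 (PySem.Int.floordiv p 2).toNat (by omega)
    rw [hk] at hfold
    rw [PySem.List.pyRange_one_append 1 (PySem.Int.floordiv p 2 + 1) p (by omega) hmp,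
      List.foldl_append, hfold]
    rw [symA_skip p _ _ ?_]
    intro d hd
    have := (PySem.List.mem_pyRange_one.mp hd)
    rw [hk] at hmem
    exact (hmem d).mpr (Or.inr (by omega))
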